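-- pv_equiv track=rewrite | github.com/vygstep/subsidence | app/src/subsidence/data/importers.py | _detect_deviation_reference
-- ===== SOURCE A (Python) =====
-- def _detect_deviation_reference(fieldnames: list[str]) -> tuple[str, str]:
--     normalized = {name.strip().casefold(): name for name in fieldnames}
--     if 'md' in normalized:
--         return 'MD', normalized['md']
--     if 'tvdss' in normalized:
--         return 'TVDSS', normalized['tvdss']
--     if 'tvd' in normalized:
--         return 'TVD', normalized['tvd']
--     raise ValueError('Deviation CSV must contain one depth column: md, tvd, or tvdss')
-- ===== SOURCE B (Python) =====
-- def _detect_deviation_reference(fieldnames: list[str]) -> tuple[str, str]: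
--     for key, label in (('md', 'MD'), ('tvdss', 'TVDSS'), ('tvd', 'TVD')):
--         matches = [name for name in fieldnames if name.strip().casefold() == key]
--         if matches:
--             return label, matches[-1]
--     raise ValueError('Deviation CSV must contain one depth column: md, tvd, or tvdss')
-- ===== Notes on version B (the rewrite author's own statement) =====
-- stated objective: simpler
-- what changed: B drops the normalization dict entirely: it scans the fieldnames once per priority key (md, tvdss, tvd) and returns the last match, instead of building a last-write-wins dict and probing it.
import Mathlib
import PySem

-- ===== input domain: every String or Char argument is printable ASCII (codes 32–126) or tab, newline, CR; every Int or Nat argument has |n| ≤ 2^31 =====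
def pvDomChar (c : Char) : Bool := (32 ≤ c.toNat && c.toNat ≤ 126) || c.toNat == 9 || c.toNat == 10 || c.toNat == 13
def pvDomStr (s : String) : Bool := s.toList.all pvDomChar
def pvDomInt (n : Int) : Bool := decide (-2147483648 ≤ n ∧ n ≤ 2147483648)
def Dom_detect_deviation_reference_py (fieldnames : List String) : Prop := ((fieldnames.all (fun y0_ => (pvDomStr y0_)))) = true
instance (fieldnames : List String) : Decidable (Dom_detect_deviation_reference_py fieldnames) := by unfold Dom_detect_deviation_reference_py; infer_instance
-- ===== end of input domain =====

-- B replaces A's normalization dict with a direct per-priority scan returning the last match: simpler, no dict.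
-- name.strip().casefold(): casefold equals lower on the ASCII domain, so this is exact on Dom_.
def pvNorm (s : String) : String := PySem.Str.lower (PySem.Str.strip s)

-- ===== PORT A =====
def detect_deviation_reference_py (fieldnames : List String) : String × String :=
  let normalized := fieldnames.foldl (fun d name => d.insert (pvNorm name) name)
    (PySem.Dict.empty : PySem.Dict String String)
  if normalized.contains "md" then ("MD", normalized.getD "md" "")
  else if normalized.contains "tvdss" then ("TVDSS", normalized.getD "tvdss" "")
  else if normalized.contains "tvd" then ("TVD", normalized.getD "tvd" "")
  else ("", "")  -- Python raises ValueError here; excluded by Pre_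

-- ===== PORT B =====
def pvScanB (fieldnames : List String) : List (String × String) → String × String
  | [] => ("", "")  -- Python raises ValueError here; excluded by Pre_
  | (key, label) :: rest =>
      let ms := fieldnames.filter (fun name => pvNorm name == key)
      if ms ≠ [] then (label, ms.getLastD "") else pvScanB fieldnames rest

def detect_deviation_reference_py_alt (fieldnames : List String) : String × String :=
  pvScanB fieldnames [("md", "MD"), ("tvdss", "TVDSS"), ("tvd", "TVD")]

-- ===== PRECONDITION & SPEC =====
-- Pre_ excludes exactly the inputs with no md/tvd/tvdss column, on which Python A raises ValueError.
def Pre_detect_deviation_reference_py (fieldnames : List String) : Prop :=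
  fieldnames.any (fun name => pvNorm name == "md" || pvNorm name == "tvdss" || pvNorm name == "tvd") = true
instance (fieldnames : List String) : Decidable (Pre_detect_deviation_reference_py fieldnames) := by
  unfold Pre_detect_deviation_reference_py; infer_instance

def pvWitness_detect_deviation_reference_py : List String := [" MD ", "x"]

def Spec_detect_deviation_reference_py (fieldnames : List String) (out : String × String) : Prop := out = detect_deviation_reference_py_alt fieldnames
instance (fieldnames : List String) (out : String × String) : Decidable (Spec_detect_deviation_reference_py fieldnames out) := by unfold Spec_detect_deviation_reference_py; infer_instance

-- ===== CLAIM (what is proved, stated in full; the proofs are below) =====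
def Claim_equal_detect_deviation_reference_py : Prop := ∀ (fieldnames : List String), Dom_detect_deviation_reference_py fieldnames → Pre_detect_deviation_reference_py fieldnames → Spec_detect_deviation_reference_py fieldnames (detect_deviation_reference_py fieldnames)

-- ===== LEMMAS AND PROOFS =====

-- The dict built by A answers get? k with the LAST fieldname normalizing to k (last write wins).
theorem pv_foldl_insert_get? (l : List String) (d : PySem.Dict String String) (k : String) :
    (l.foldl (fun d n => d.insert (pvNorm n) n) d).get? k =
      ((l.filter (fun n => pvNorm n == k)).getLast?).or (d.get? k) := by
  induction l using List.reverseRecOn generalizing d with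
  | nil => simp
  | append_singleton l a ih =>
      simp only [List.foldl_append, List.foldl_cons, List.foldl_nil, List.filter_append,
        List.filter_cons, List.filter_nil]
      rw [PySem.Dict.get?_insert]
      by_cases h : pvNorm a == k
      · simp [beq_iff_eq.mp h]
      · have hk : ¬ k = pvNorm a := fun e => h (by simp [e])
        simp [h, hk, ih]

theorem pv_A_eq_scan (fieldnames : List String) (k : String) :
    ((fieldnames.foldl (fun d n => d.insert (pvNorm n) n)
        (PySem.Dict.empty : PySem.Dict String String)).get? k) =
      (fieldnames.filter (fun n => pvNorm n == k)).getLast? := by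
  rw [pv_foldl_insert_get?]; simp

theorem pv_contains_eq (fieldnames : List String) (k : String) :
    ((fieldnames.foldl (fun d n => d.insert (pvNorm n) n)
        (PySem.Dict.empty : PySem.Dict String String)).contains k) =
      ((fieldnames.filter (fun n => pvNorm n == k)).getLast?).isSome := by
  rw [PySem.Dict.contains_eq_isSome_get?, pv_A_eq_scan]

theorem pv_getLastD_of_ne_nil {l : List String} (h : l ≠ []) :
    l.getLast? = some (l.getLastD "") := by
  cases e : l.getLast? with
  | none => exact absurd (List.getLast?_eq_none_iff.mp e) h
  | some v => simp [List.getLastD_eq_getLast?, e]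

-- ===== VERDICT (by name: the statement is the Claim_ definition above) =====
theorem detect_deviation_reference_py_spec : Claim_equal_detect_deviation_reference_py := by
  intro fieldnames _ hpre
  unfold Spec_detect_deviation_reference_py detect_deviation_reference_py
    detect_deviation_reference_py_alt
  simp only [pvScanB]
  have key : ∀ k : String,
      ((fieldnames.foldl (fun d n => d.insert (pvNorm n) n)
        (PySem.Dict.empty : PySem.Dict String String)).contains k) = true ↔
      fieldnames.filter (fun n => pvNorm n == k) ≠ [] := by
    intro k
    rw [pv_contains_eq]
    constructor
    · intro h hnil; simp [hnil] at h
    · intro h; rw [pv_getLastD_of_ne_nil h]; rfl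
  have val : ∀ k : String, fieldnames.filter (fun n => pvNorm n == k) ≠ [] →
      ((fieldnames.foldl (fun d n => d.insert (pvNorm n) n)
        (PySem.Dict.empty : PySem.Dict String String)).getD k "") =
      (fieldnames.filter (fun n => pvNorm n == k)).getLastD "" := by
    intro k h
    rw [PySem.Dict.getD_eq_get?_getD, pv_A_eq_scan, pv_getLastD_of_ne_nil h]; rfl
  have ex : ∀ k : String, (fieldnames.filter (fun n => pvNorm n == k) ≠ []) ↔
      ∃ x ∈ fieldnames, pvNorm x = k := by
    intro k
    rw [ne_eq, List.filter_eq_nil_iff]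
    push_neg
    simp
  by_cases hmd : fieldnames.filter (fun n => pvNorm n == "md") ≠ []
  · simp [(ex "md").mp hmd, (key "md").mpr hmd, val "md" hmd]
  · have cmd : ((fieldnames.foldl (fun d n => d.insert (pvNorm n) n)
        (PySem.Dict.empty : PySem.Dict String String)).contains "md") = false := by
      by_contra h
      exact hmd ((key "md").mp (by revert h; cases ((fieldnames.foldl (fun d n => d.insert (pvNorm n) n) (PySem.Dict.empty : PySem.Dict String String)).contains "md") <;> simp))
    by_cases hss : fieldnames.filter (fun n => pvNorm n == "tvdss") ≠ []
    · have hmdE : ¬ ∃ x ∈ fieldnames, pvNorm x = "md" := fun h => hmd ((ex "md").mpr h)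
      simp [hmdE, cmd, (ex "tvdss").mp hss, (key "tvdss").mpr hss, val "tvdss" hss]
    · have css : ((fieldnames.foldl (fun d n => d.insert (pvNorm n) n)
          (PySem.Dict.empty : PySem.Dict String String)).contains "tvdss") = false := by
        by_contra h
        exact hss ((key "tvdss").mp (by revert h; cases ((fieldnames.foldl (fun d n => d.insert (pvNorm n) n) (PySem.Dict.empty : PySem.Dict String String)).contains "tvdss") <;> simp))
      have htvd : fieldnames.filter (fun n => pvNorm n == "tvd") ≠ [] := by
        simp only [Pre_detect_deviation_reference_py, List.any_eq_true] at hpre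
        obtain ⟨n, hn, hk⟩ := hpre
        simp only [not_not, List.filter_eq_nil_iff] at hmd hss
        intro hnil
        rw [List.filter_eq_nil_iff] at hnil
        simp only [Bool.or_eq_true] at hk
        rcases hk with (h | h) | h
        · exact absurd h (by simpa using hmd n hn)
        · exact absurd h (by simpa using hss n hn)
        · exact absurd h (by simpa using hnil n hn)
      have hmdE : ¬ ∃ x ∈ fieldnames, pvNorm x = "md" := fun h => hmd ((ex "md").mpr h)
      have hssE : ¬ ∃ x ∈ fieldnames, pvNorm x = "tvdss" := fun h => hss ((ex "tvdss").mpr h)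
      simp [hmdE, hssE, cmd, css, (ex "tvd").mp htvd, (key "tvd").mpr htvd, val "tvd" htvd]
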